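-- pv_equiv track=rewrite | github.com/mghaynes/cy305-py-dbutils | DAOdbUtils.py | ExactRecordsMatch
-- ===== SOURCE A (Python) =====
-- def ExactRecordsMatch(table1_recs, table2_recs):
--     exact_rec_score = 4
--     # check exact table match (i.e. row,col values all match)
--     for cnt, row in enumerate(table1_recs):
--         if exact_rec_score == 4:
--             if row != table2_recs[cnt]:
--                 exact_rec_score = 3
--         # check row values match (i.e. col order doesn't matter) (allows for extra columns)
--         if exact_rec_score == 3:
--             if set(row).intersection(table2_recs[cnt]) != set(row):
--                 return 2
--     return exact_rec_score
-- ===== SOURCE B (Python) =====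
-- def ExactRecordsMatch(table1_recs, table2_recs):
--     # exact match: table2 starts with exactly table1's rows
--     if table2_recs[:len(table1_recs)] == table1_recs:
--         return 4
--     # reordered/extra-column match: each row's values are contained in the other row
--     if all(set(r1) <= set(r2) for r1, r2 in zip(table1_recs, table2_recs)):
--         return 3
--     return 2
-- ===== Notes on version B (the rewrite author's own statement) =====
-- stated objective: simpler
-- what changed: Replaced A's stateful enumerate loop carrying a 4/3 score flag with per-row early returns by two wholesale predicates: a single prefix-slice comparison (table2_recs[:len(table1_recs)] == table1_recs) for the exact case, then one all() over zip(table1,table2) of set-subset tests for the reordered case.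
import Mathlib
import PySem

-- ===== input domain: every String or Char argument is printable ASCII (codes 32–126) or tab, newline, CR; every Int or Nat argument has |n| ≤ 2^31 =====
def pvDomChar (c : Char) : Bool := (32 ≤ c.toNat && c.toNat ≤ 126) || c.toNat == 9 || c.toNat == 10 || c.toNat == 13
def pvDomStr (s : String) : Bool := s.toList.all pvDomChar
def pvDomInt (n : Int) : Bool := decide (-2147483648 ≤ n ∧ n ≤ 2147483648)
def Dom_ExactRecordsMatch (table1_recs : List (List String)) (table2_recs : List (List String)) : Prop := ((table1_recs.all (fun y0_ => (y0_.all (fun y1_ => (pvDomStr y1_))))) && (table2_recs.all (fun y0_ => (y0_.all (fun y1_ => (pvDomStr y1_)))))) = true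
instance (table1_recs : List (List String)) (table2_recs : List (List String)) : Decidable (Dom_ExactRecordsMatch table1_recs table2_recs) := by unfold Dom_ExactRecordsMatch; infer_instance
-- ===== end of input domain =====

-- B replaces A's stateful enumerate loop (score flag 4/3, per-row early return) by two wholesale
-- predicates: a prefix-slice comparison, then an all-rows zip subset test (alternative
-- decomposition, same cost; return value only).

-- ===== PORT A =====
-- set(row).intersection(t2row) != set(row)
def pvInterFails (row t2row : List String) : Bool :=
  !(PySem.Set.equal (PySem.Set.inter (PySem.Set.ofList row) t2row) (PySem.Set.ofList row))

-- A's loop: rows = remaining rows of table1, cnt = enumerate counter, score ∈ {4, 3}.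
-- pyGet? none = Python IndexError (excluded by Pre_); 0 is a dummy value there.
def pvALoop (t2 : List (List String)) : List (List String) → Nat → Int → Int
  | [], _, score => score
  | row :: rest, cnt, score =>
    if score == 4 then
      match PySem.List.pyGet? t2 (cnt : Int) with
      | none => 0
      | some t2row =>
        if row ≠ t2row then
          -- score becomes 3, and the second 'if' fires in the same iteration
          if pvInterFails row t2row then 2 else pvALoop t2 rest (cnt + 1) 3
        else pvALoop t2 rest (cnt + 1) 4
    else if score == 3 then
      match PySem.List.pyGet? t2 (cnt : Int) with
      | none => 0
      | some t2row =>
        if pvInterFails row t2row then 2 else pvALoop t2 rest (cnt + 1) 3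
    else pvALoop t2 rest (cnt + 1) score

def ExactRecordsMatch (table1_recs : List (List String)) (table2_recs : List (List String)) : Int :=
  pvALoop table2_recs table1_recs 0 4

-- ===== PORT B =====
-- set(r1) <= set(r2)
def pvRowSub (r1 r2 : List String) : Bool :=
  PySem.Set.issubset (PySem.Set.ofList r1) (PySem.Set.ofList r2)

-- table2_recs[:len(table1_recs)] == table1_recs;  all(set(r1) <= set(r2) for r1, r2 in zip(...))
def ExactRecordsMatch_alt (table1_recs : List (List String)) (table2_recs : List (List String)) : Int :=
  if PySem.List.slice table2_recs none (some (table1_recs.length : Int)) == table1_recs then 4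
  else if (table1_recs.zip table2_recs).all (fun p => pvRowSub p.1 p.2) then 3
  else 2

-- ===== PRECONDITION & SPEC =====
-- Pre_ excludes exactly the inputs on which A raises IndexError:
-- table2 shorter than table1 with no row failing the subset test before table2 runs out.
def Pre_ExactRecordsMatch (table1_recs : List (List String)) (table2_recs : List (List String)) : Prop :=
  table1_recs.length ≤ table2_recs.length ∨
    ∃ j, j < table2_recs.length ∧ ∃ x ∈ table1_recs.getD j [], x ∉ table2_recs.getD j []
instance (table1_recs : List (List String)) (table2_recs : List (List String)) : Decidable (Pre_ExactRecordsMatch table1_recs table2_recs) := by unfold Pre_ExactRecordsMatch; infer_instance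
def pvWitness_ExactRecordsMatch : List (List String) × List (List String) := ([["a", "b"]], [["b", "a"], ["c"]])
def Spec_ExactRecordsMatch (table1_recs : List (List String)) (table2_recs : List (List String)) (out : Int) : Prop := out = ExactRecordsMatch_alt table1_recs table2_recs
instance (table1_recs : List (List String)) (table2_recs : List (List String)) (out : Int) : Decidable (Spec_ExactRecordsMatch table1_recs table2_recs out) := by unfold Spec_ExactRecordsMatch; infer_instance

-- ===== CLAIM (what is proved, stated in full; the proofs are below) =====
def Claim_equal_ExactRecordsMatch : Prop := ∀ (table1_recs : List (List String)) (table2_recs : List (List String)), Dom_ExactRecordsMatch table1_recs table2_recs → Pre_ExactRecordsMatch table1_recs table2_recs → Spec_ExactRecordsMatch table1_recs table2_recs (ExactRecordsMatch table1_recs table2_recs)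

-- ===== LEMMAS AND PROOFS =====

-- A's intersection test is the negated subset test
theorem pvInterFails_eq (row t2row : List String) :
    pvInterFails row t2row = !pvRowSub row t2row := by
  unfold pvInterFails pvRowSub
  congr 1
  by_cases h : PySem.Set.issubset (PySem.Set.ofList row) (PySem.Set.ofList t2row) = true
  · rw [h, PySem.Set.equal_iff]
    rw [PySem.Set.issubset_iff] at h
    intro x
    simp only [PySem.Set.mem_inter]
    constructor
    · exact fun hx => hx.1
    · intro hx
      refine ⟨hx, ?_⟩
      have := h x hx
      simpa [PySem.Set.mem_ofList] using this
  · rw [Bool.not_eq_true] at h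
    rw [h, Bool.eq_false_iff]
    intro hc
    rw [PySem.Set.equal_iff] at hc
    have hs : PySem.Set.issubset (PySem.Set.ofList row) (PySem.Set.ofList t2row) = true := by
      rw [PySem.Set.issubset_iff]
      intro x hx
      have := ((PySem.Set.mem_inter _ _ _).mp ((hc x).mpr hx)).2
      simpa [PySem.Set.mem_ofList] using this
    rw [h] at hs
    exact Bool.false_ne_true hs

theorem pvRowSub_true_iff (r1 r2 : List String) :
    pvRowSub r1 r2 = true ↔ ∀ x ∈ r1, x ∈ r2 := by
  unfold pvRowSub
  rw [PySem.Set.issubset_iff]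
  constructor
  · intro h x hx
    have := h x (by simp [PySem.Set.mem_ofList, hx])
    simpa [PySem.Set.mem_ofList] using this
  · intro h x hx
    rw [PySem.Set.mem_ofList] at hx ⊢
    exact h x hx

-- proof-side two-list form of A's loop (absolute index eliminated)
def pvA2 : List (List String) → List (List String) → Int → Int
  | [], _, score => score
  | _ :: _, [], _ => 0          -- corresponds to A's IndexError (excluded by Pre_)
  | row :: rest, t :: ts, score =>
    if score == 4 then
      (if row ≠ t then
        (if pvInterFails row t then 2 else pvA2 rest ts 3)
      else pvA2 rest ts 4)
    else if score == 3 then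
      (if pvInterFails row t then 2 else pvA2 rest ts 3)
    else pvA2 rest ts score

theorem pvALoop_eq_pvA2 (t2 : List (List String)) :
    ∀ (t1 : List (List String)) (cnt : Nat) (s : Int), s = 4 ∨ s = 3 →
      pvALoop t2 t1 cnt s = pvA2 t1 (t2.drop cnt) s := by
  intro t1
  induction t1 with
  | nil => intro cnt s _; rfl
  | cons row rest ih =>
    intro cnt s hs
    have hget : PySem.List.pyGet? t2 ((cnt : Nat) : Int) = (t2.drop cnt).head? := by
      rw [PySem.List.pyGet?_natCast, ← List.head?_drop]
    unfold pvALoop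
    rw [hget]
    cases hd : t2.drop cnt with
    | nil =>
      unfold pvA2
      rcases hs with rfl | rfl <;> rfl
    | cons t ts =>
      have hts : t2.drop (cnt + 1) = ts := by
        have := congrArg List.tail hd
        simpa using this
      unfold pvA2
      simp only [List.head?_cons]
      rcases hs with rfl | rfl
      · simp only [show ((4 : Int) == 4) = true from rfl, reduceIte]
        split
        · split
          · rfl
          · rw [ih cnt.succ 3 (Or.inr rfl), hts]
        · rw [ih cnt.succ 4 (Or.inl rfl), hts]
      · simp only [show ((3 : Int) == 4) = false from rfl, Bool.false_eq_true, reduceIte,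
          show ((3 : Int) == 3) = true from rfl]
        split
        · rfl
        · rw [ih cnt.succ 3 (Or.inr rfl), hts]

-- Pre_ descends along equality-or-subset heads
theorem pvPre_tail (r t : List String) (rs ts : List (List String))
    (hsub : ∀ x ∈ r, x ∈ t)
    (hp : Pre_ExactRecordsMatch (r :: rs) (t :: ts)) : Pre_ExactRecordsMatch rs ts := by
  unfold Pre_ExactRecordsMatch at hp ⊢
  rcases hp with h | ⟨j, hj, x, hx, hnx⟩
  · left; simpa using h
  · cases j with
    | zero =>
      simp only [List.getD_cons_zero] at hx hnx
      exact absurd (hsub x hx) hnx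
    | succ k =>
      right
      refine ⟨k, by simpa using hj, x, ?_, ?_⟩
      · simpa [List.getD_cons_succ] using hx
      · simpa [List.getD_cons_succ] using hnx

theorem pvPre_not_nil (r : List String) (rs : List (List String))
    (hp : Pre_ExactRecordsMatch (r :: rs) []) : False := by
  unfold Pre_ExactRecordsMatch at hp
  rcases hp with h | ⟨j, hj, _⟩
  · simp at h
  · simp at hj

-- A's score-3 phase is the zip subset test
theorem pvA2_three (t1 : List (List String)) :
    ∀ t2, Pre_ExactRecordsMatch t1 t2 →
      pvA2 t1 t2 3 = (if (t1.zip t2).all (fun p => pvRowSub p.1 p.2) then 3 else 2) := by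
  induction t1 with
  | nil => intro t2 _; simp [pvA2]
  | cons r rs ih =>
    intro t2 hp
    cases t2 with
    | nil => exact absurd hp (fun h => pvPre_not_nil r rs h)
    | cons t ts =>
      unfold pvA2
      simp only [show ((3 : Int) == 4) = false from rfl, Bool.false_eq_true, reduceIte,
        show ((3 : Int) == 3) = true from rfl, pvInterFails_eq, List.zip_cons_cons, List.all_cons]
      by_cases hs : pvRowSub r t = true
      · have hsub : ∀ x ∈ r, x ∈ t := (pvRowSub_true_iff r t).mp hs
        simp only [hs, Bool.not_true, Bool.false_eq_true, reduceIte, Bool.true_and]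
        exact ih ts (pvPre_tail r t rs ts hsub hp)
      · have hs' : pvRowSub r t = false := by simpa using hs
        simp [hs']

-- A's score-4 phase is the prefix-slice comparison, then the zip subset test
theorem pvA2_four (t1 : List (List String)) :
    ∀ t2, Pre_ExactRecordsMatch t1 t2 →
      pvA2 t1 t2 4 =
        (if t2.take t1.length == t1 then (4 : Int)
         else if (t1.zip t2).all (fun p => pvRowSub p.1 p.2) then 3 else 2) := by
  induction t1 with
  | nil => intro t2 _; simp [pvA2]
  | cons r rs ih =>
    intro t2 hp
    cases t2 with
    | nil => exact absurd hp (fun h => pvPre_not_nil r rs h)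
    | cons t ts =>
      unfold pvA2
      simp only [show ((4 : Int) == 4) = true from rfl, reduceIte, List.length_cons,
        List.take_succ_cons, List.zip_cons_cons, List.all_cons, pvInterFails_eq,
        List.cons_beq_cons]
      by_cases heq : r = t
      · subst heq
        have hcr : pvRowSub r r = true := (pvRowSub_true_iff r r).mpr (fun x hx => hx)
        simp only [ne_eq, not_true_eq_false, reduceIte, BEq.rfl, Bool.true_and, hcr]
        exact ih ts (pvPre_tail r r rs ts (fun x hx => hx) hp)
      · have hbne : (t == r) = false := by
          simp [beq_eq_false_iff_ne]
          exact fun h => heq h.symm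
        simp only [ne_eq, heq, not_false_eq_true, reduceIte, hbne, Bool.false_and,
          Bool.false_eq_true]
        by_cases hs : pvRowSub r t = true
        · have hsub : ∀ x ∈ r, x ∈ t := (pvRowSub_true_iff r t).mp hs
          simp only [hs, Bool.not_true, Bool.false_eq_true, reduceIte, Bool.true_and]
          exact pvA2_three rs ts (pvPre_tail r t rs ts hsub hp)
        · have hs' : pvRowSub r t = false := by simpa using hs
          simp [hs']

-- ===== VERDICT (by name: the statement is the Claim_ definition above) =====
theorem ExactRecordsMatch_spec : Claim_equal_ExactRecordsMatch := by
  intro t1 t2 _ hpre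
  unfold Spec_ExactRecordsMatch ExactRecordsMatch ExactRecordsMatch_alt
  rw [pvALoop_eq_pvA2 t2 t1 0 4 (Or.inl rfl), List.drop_zero, pvA2_four t1 t2 hpre,
    PySem.List.slice_to_natCast]
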